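-- pv_equiv track=rewrite | github.com/ZverkovMikhail/python_seminars_3658 | seminar_4/task_5.py | find_synonym
-- ===== SOURCE A (Python) =====
-- def find_synonym(s):
--
--     strs = {'Hello': 'Hi', 'Bye': 'Goodbye', 'List': 'Array'}
--
--     for k, v in strs.items():
--         if k.lower() == s.lower():
--             return v
--         elif v.lower() == s.lower():
--             return k
--     return 'Не найден!'
-- ===== SOURCE B (Python) =====
-- # Flat precomputed lowercase lookup table (key->value and value->key), one dict.get instead of a scan.
-- _LOOKUP = {'hello': 'Hi', 'hi': 'Hello',
--            'bye': 'Goodbye', 'goodbye': 'Bye',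
--            'list': 'Array', 'array': 'List'}
--
--
-- def find_synonym(s):
--     return _LOOKUP.get(s.lower(), 'Не найден!')
-- ===== Notes on version B (the rewrite author's own statement) =====
-- stated objective: idiomatic
-- what changed: Replaces the runtime scan over dict items with pairwise lowercase comparisons by a precomputed flat lowercase bidirectional table and a single dict.get with a default.
import Mathlib
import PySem

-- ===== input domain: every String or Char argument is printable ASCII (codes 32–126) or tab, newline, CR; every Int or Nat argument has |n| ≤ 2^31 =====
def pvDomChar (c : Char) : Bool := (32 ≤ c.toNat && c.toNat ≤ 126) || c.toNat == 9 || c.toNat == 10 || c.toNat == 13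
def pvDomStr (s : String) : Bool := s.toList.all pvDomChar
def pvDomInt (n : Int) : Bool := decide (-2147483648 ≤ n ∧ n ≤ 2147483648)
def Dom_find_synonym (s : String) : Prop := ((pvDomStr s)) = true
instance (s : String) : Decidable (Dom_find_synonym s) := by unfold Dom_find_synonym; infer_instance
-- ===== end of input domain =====

-- B replaces A's scan over dict entries (two lowercase comparisons each) by one lookup in a
-- precomputed flat lowercase bidirectional table; same result for every input.


-- ===== PORT A =====
-- the loop 'for k, v in strs.items(): …' over the literal dict's items
def findSynLoopA (items : List (String × String)) (s : String) : String :=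
  match items with
  | [] => "Не найден!"
  | (k, v) :: rest =>
    if PySem.Str.lower k == PySem.Str.lower s then v
    else if PySem.Str.lower v == PySem.Str.lower s then k
    else findSynLoopA rest s

def find_synonym (s : String) : String :=
  findSynLoopA (PySem.Dict.ofList [("Hello", "Hi"), ("Bye", "Goodbye"), ("List", "Array")]).items s

-- ===== PORT B =====
-- the precomputed flat lowercase table _LOOKUP of Source B
def findSynTableB : PySem.Dict String String :=
  PySem.Dict.ofList [("hello", "Hi"), ("hi", "Hello"),
                     ("bye", "Goodbye"), ("goodbye", "Bye"),
                     ("list", "Array"), ("array", "List")]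

def find_synonym_alt (s : String) : String :=
  findSynTableB.getD (PySem.Str.lower s) "Не найден!"

-- ===== PRECONDITION & SPEC =====
def Spec_find_synonym (s : String) (out : String) : Prop := out = find_synonym_alt s
instance (s : String) (out : String) : Decidable (Spec_find_synonym s out) := by unfold Spec_find_synonym; infer_instance

-- ===== CLAIM (what is proved, stated in full; the proofs are below) =====
def Claim_equal_find_synonym : Prop := ∀ (s : String), Dom_find_synonym s → Spec_find_synonym s (find_synonym s)

-- ===== LEMMAS AND PROOFS =====

-- ===== VERDICT (by name: the statement is the Claim_ definition above) =====
set_option maxRecDepth 2048 in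
theorem find_synonym_spec : Claim_equal_find_synonym := by
  intro s _
  unfold Spec_find_synonym find_synonym find_synonym_alt findSynTableB
  have hA : (PySem.Dict.ofList [("Hello", "Hi"), ("Bye", "Goodbye"), ("List", "Array")]).items
      = [("Hello", "Hi"), ("Bye", "Goodbye"), ("List", "Array")] := by rfl
  have hB : (PySem.Dict.ofList [("hello", "Hi"), ("hi", "Hello"), ("bye", "Goodbye"),
        ("goodbye", "Bye"), ("list", "Array"), ("array", "List")]).items
      = [("hello", "Hi"), ("hi", "Hello"), ("bye", "Goodbye"),
         ("goodbye", "Bye"), ("list", "Array"), ("array", "List")] := by rfl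
  rw [hA]
  simp only [findSynLoopA, PySem.Dict.getD, PySem.Dict.get?, hB, List.find?_cons,
    show PySem.Str.lower "Hello" = "hello" from rfl,
    show PySem.Str.lower "Hi" = "hi" from rfl,
    show PySem.Str.lower "Bye" = "bye" from rfl,
    show PySem.Str.lower "Goodbye" = "goodbye" from rfl,
    show PySem.Str.lower "List" = "list" from rfl,
    show PySem.Str.lower "Array" = "array" from rfl]
  clear hA hB
  generalize PySem.Str.lower s = t
  cases h1 : ("hello" == t) <;> cases h2 : ("hi" == t) <;> cases h3 : ("bye" == t) <;>
    cases h4 : ("goodbye" == t) <;> cases h5 : ("list" == t) <;> cases h6 : ("array" == t) <;>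
    first | rfl | (simp only [h1, h2, h3, h4, h5, h6]; rfl)
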